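-- pv_equiv track=rewrite | github.com/RamsesXVII/infovis2.0 | oddi/random_tringulation_generator.py | getDegreeSequence
-- ===== SOURCE A (Python) =====
-- def getDegreeSequence(triangulation):
--     nodeToCount=dict()
--     for triangle in triangulation:
--         for node in triangle:
--             if node in nodeToCount:
--                 nodeToCount[node]+=1
--             else:
--                 nodeToCount[node]=2
--
--     degreeSequence=list()
--     for node in sorted(nodeToCount.keys()):
--         degreeSequence.append(nodeToCount[node])
--
--     return degreeSequence
-- ===== SOURCE B (Python) =====
-- def getDegreeSequence(triangulation):
--     flat = sorted(node for triangle in triangulation for node in triangle)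
--     degreeSequence = []
--     i = 0
--     n = len(flat)
--     while i < n:
--         j = i + 1
--         while j < n and flat[j] == flat[i]:
--             j += 1
--         degreeSequence.append(j - i + 1)
--         i = j
--     return degreeSequence
-- ===== Notes on version B (the rewrite author's own statement) =====
-- stated objective: alternative
-- what changed: Replaces the membership-tested dict counting plus a separate key-sort with sort-first run-length encoding: flatten, sort once, then one linear scan emitting run length + 1 per group.
import Mathlib
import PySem

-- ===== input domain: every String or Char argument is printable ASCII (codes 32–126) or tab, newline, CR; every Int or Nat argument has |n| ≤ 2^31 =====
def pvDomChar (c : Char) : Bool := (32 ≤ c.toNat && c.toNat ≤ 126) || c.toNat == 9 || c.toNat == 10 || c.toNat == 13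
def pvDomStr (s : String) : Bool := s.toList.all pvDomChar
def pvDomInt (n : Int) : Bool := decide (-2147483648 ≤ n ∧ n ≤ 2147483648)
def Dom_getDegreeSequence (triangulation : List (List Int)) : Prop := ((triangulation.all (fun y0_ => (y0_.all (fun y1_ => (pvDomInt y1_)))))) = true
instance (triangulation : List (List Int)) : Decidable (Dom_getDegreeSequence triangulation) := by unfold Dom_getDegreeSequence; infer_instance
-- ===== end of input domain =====

-- B replaces A's membership-tested dict counting plus separate key-sort with sort-first
-- run-length encoding (flatten, sort once, one linear grouping scan); alternative, similar cost.


-- ===== PORT A =====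
-- 'nodeToCount[node]' in the second loop looks up a key that is always present: ported as getD _ 0.
def getDegreeSequence (triangulation : List (List Int)) : List Int :=
  let nodeToCount : PySem.Dict Int Int :=
    triangulation.foldl (fun d triangle =>
      triangle.foldl (fun d node =>
        if d.contains node then d.insert node (d.getD node 0 + 1)
        else d.insert node 2) d) PySem.Dict.empty
  (PySem.List.sorted nodeToCount.keys (fun x => x) false).foldl
    (fun acc node => acc ++ [nodeToCount.getD node 0]) []

-- ===== PORT B =====
-- inner while loop of Source B: walk to the end of the run of the current value, counting it
def rleGo (x cnt : Int) : List Int → List Int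
  | [] => [cnt + 1]
  | y :: ys => if y = x then rleGo x (cnt + 1) ys else (cnt + 1) :: rleGo y 1 ys

-- outer while loop of Source B over the sorted flat list
def rle : List Int → List Int
  | [] => []
  | x :: xs => rleGo x 1 xs

def getDegreeSequence_alt (triangulation : List (List Int)) : List Int :=
  let flat := PySem.List.sorted (triangulation.flatMap (fun triangle => triangle)) (fun x => x) false
  rle flat

-- ===== PRECONDITION & SPEC =====
def Spec_getDegreeSequence (triangulation : List (List Int)) (out : List Int) : Prop := out = getDegreeSequence_alt triangulation
instance (triangulation : List (List Int)) (out : List Int) : Decidable (Spec_getDegreeSequence triangulation out) := by unfold Spec_getDegreeSequence; infer_instance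

-- ===== CLAIM (what is proved, stated in full; the proofs are below) =====
def Claim_equal_getDegreeSequence : Prop := ∀ (triangulation : List (List Int)), Dom_getDegreeSequence triangulation → Spec_getDegreeSequence triangulation (getDegreeSequence triangulation)

-- ===== LEMMAS AND PROOFS =====

-- A's counting step written as a single insert (the branch only chooses the stored value)
theorem stepA_eq (d : PySem.Dict Int Int) (node : Int) :
    (if d.contains node then d.insert node (d.getD node 0 + 1) else d.insert node 2)
      = d.insert node (if d.contains node then d.getD node 0 + 1 else 2) := by
  by_cases h : d.contains node <;> simp [h]

-- A's dict stores count + 1 for every key that occurred, and leaves other keys alone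
theorem getD_foldA (l : List Int) :
    ∀ (d : PySem.Dict Int Int) (v : Int),
    (l.foldl (fun d x => d.insert x (if d.contains x then d.getD x 0 + 1 else 2)) d).getD v 0
      = d.getD v 0 + l.count v + (if v ∈ l ∧ d.contains v = false then 1 else 0) := by
  induction l with
  | nil => intro d v; simp
  | cons x l ih =>
    intro d v
    simp only [List.foldl_cons, ih, List.count_cons, List.mem_cons]
    rw [PySem.Dict.getD_insert, PySem.Dict.contains_insert]
    by_cases hvx : v = x
    · subst hvx
      by_cases hc : d.contains v
      · simp [hc]; ring
      · have h0 : d.getD v 0 = 0 := PySem.Dict.getD_of_not_contains _ _ (by simpa using hc)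
        simp [hc, h0]; ring
    · by_cases hm : v ∈ l <;> by_cases hc : d.contains v = true <;>
        simp [hvx, hm, hc] <;> omega

theorem discard_eq_filter (s : List Int) (x : Int) :
    PySem.Set.discard s x = s.filter (fun y => y != x) := rfl

theorem ofList_sublist (xs : List Int) :
    (PySem.Set.ofList xs).Sublist xs := by
  induction xs with
  | nil => simp [PySem.Set.ofList_nil]
  | cons x xs ih =>
    rw [PySem.Set.ofList_cons, discard_eq_filter]
    exact List.Sublist.cons₂ x (List.filter_sublist.trans ih)

-- B's inner scan on a ≤-sorted tail: one group of the head value, then the remaining groups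
theorem goG (xs : List Int) :
    ∀ (x c : Int), (x :: xs).Pairwise (· ≤ ·) →
    rleGo x c xs = (c + (xs.count x : Int) + 1)
      :: (PySem.Set.discard (PySem.Set.ofList xs) x).map (fun k => ((xs.count k : Int)) + 1) := by
  induction xs with
  | nil => intro x c _; simp [rleGo, PySem.Set.ofList_nil, PySem.Set.discard]
  | cons y ys ih =>
    intro x c h
    have hxy : x ≤ y := (List.pairwise_cons.1 h).1 y (by simp)
    have hys : (y :: ys).Pairwise (· ≤ ·) := (List.pairwise_cons.1 h).2
    by_cases hyx : y = x
    · subst hyx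
      have h' : (y :: ys).Pairwise (· ≤ ·) := hys
      rw [show rleGo y c (y :: ys) = rleGo y (c + 1) ys by simp [rleGo], ih y (c+1) h']
      congr 1
      · simp; ring
      · rw [PySem.Set.ofList_cons, discard_eq_filter, discard_eq_filter]
        simp only [List.filter_cons, bne_self_eq_false, Bool.false_eq_true,
          if_false, List.filter_filter, Bool.and_self]
        apply List.map_congr_left
        intro k hk
        have hkne : k ≠ y := by
          have := List.of_mem_filter hk; simpa using this
        simp [Ne.symm hkne]
    · have hxnot : x ∉ y :: ys := by
        intro hmem
        rcases List.mem_cons.1 hmem with h1 | h2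
        · exact hyx h1.symm
        · have : y ≤ x := (List.pairwise_cons.1 hys).1 x h2
          exact hyx (le_antisymm this hxy)
      rw [show rleGo x c (y :: ys) = (c+1) :: rleGo y 1 ys by simp [rleGo, hyx], ih y 1 hys]
      have hcx : (y :: ys).count x = 0 := List.count_eq_zero.2 hxnot
      congr 1
      · rw [hcx]; push_cast; ring
      · rw [PySem.Set.ofList_cons]
        rw [show PySem.Set.discard (y :: PySem.Set.discard (PySem.Set.ofList ys) y) x
              = List.filter (fun z => z != x) (y :: PySem.Set.discard (PySem.Set.ofList ys) y) from rfl]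
        rw [List.filter_cons]
        have hxy' : (y != x) = true := by simpa using (Ne.symm (fun e => hyx e.symm) : y ≠ x)
        rw [if_pos hxy']
        have hfix : List.filter (fun z => z != x) (PySem.Set.discard (PySem.Set.ofList ys) y)
            = PySem.Set.discard (PySem.Set.ofList ys) y := by
          apply List.filter_eq_self.2
          intro z hz
          have hzys : z ∈ ys := (ofList_sublist ys).mem ((List.filter_sublist).mem (by rw [discard_eq_filter] at hz; exact hz))
          have : z ≠ x := fun e => hxnot (by simp [e ▸ hzys])
          simpa using this
        rw [hfix]
        congr 1
        · simp; ring
        · apply List.map_congr_left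
          intro k hk
          have hkne : k ≠ y := by
            rw [discard_eq_filter] at hk
            have := List.of_mem_filter hk; simpa using this
          simp [Ne.symm hkne]

-- B on a ≤-sorted list: run lengths + 1, indexed by the distinct values in order
theorem rle_sorted (s : List Int) (h : s.Pairwise (· ≤ ·)) :
    rle s = (PySem.Set.ofList s).map (fun k => ((s.count k : Int)) + 1) := by
  cases s with
  | nil => simp [rle, PySem.Set.ofList_nil]
  | cons x xs =>
    rw [show rle (x :: xs) = rleGo x 1 xs from rfl, goG xs x 1 h, PySem.Set.ofList_cons]
    congr 1
    · simp; ring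
    · apply List.map_congr_left
      intro k hk
      have hkne : k ≠ x := by
        rw [discard_eq_filter] at hk
        have := List.of_mem_filter hk; simpa using this
      simp [Ne.symm hkne]

theorem main_eq (t : List (List Int)) : getDegreeSequence t = getDegreeSequence_alt t := by
  simp only [getDegreeSequence, getDegreeSequence_alt]
  have hflat : t.flatMap (fun triangle => triangle) = t.flatten := List.flatMap_id
  set flat := t.flatten with hf
  -- the nested counting loop is a single loop over the flattened list
  have hnest : (t.foldl (fun d triangle =>
      triangle.foldl (fun d node =>
        if d.contains node then d.insert node (d.getD node 0 + 1)
        else d.insert node 2) d) (PySem.Dict.empty : PySem.Dict Int Int))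
      = flat.foldl (fun d x => d.insert x (if d.contains x then d.getD x 0 + 1 else 2))
          (PySem.Dict.empty : PySem.Dict Int Int) := by
    rw [hf, List.foldl_flatten]
    congr 1
    funext b l
    congr 1
    funext d x
    exact stepA_eq d x
  rw [hnest, hflat]
  set dA := flat.foldl (fun d x => d.insert x (if d.contains x then d.getD x 0 + 1 else 2))
      (PySem.Dict.empty : PySem.Dict Int Int) with hdA
  have hkeys : dA.keys = PySem.Set.ofList flat := by
    rw [hdA, PySem.Dict.keys_foldl_insert, PySem.Dict.keys_empty, PySem.Set.update_nil_left]
  set s := PySem.List.sorted flat (fun x => x) false with hs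
  have hsp : s.Pairwise (· ≤ ·) := PySem.List.sorted_pairwise flat (fun x => x)
  have hperm : s.Perm flat := PySem.List.sorted_perm flat (fun x => x) false
  have hsub : (PySem.Set.ofList s).Sublist s := ofList_sublist s
  have hnodup : (PySem.Set.ofList s).Nodup := PySem.Set.nodup_ofList s
  have hlt : (PySem.Set.ofList s).Pairwise (fun a b => a < b) := by
    have hle := hsp.sublist hsub
    exact (hle.and hnodup).imp (fun h => lt_of_le_of_ne h.1 h.2)
  have hpermSet : (PySem.Set.ofList s).Perm (PySem.Set.ofList flat) := by
    rw [List.perm_ext_iff_of_nodup hnodup (PySem.Set.nodup_ofList flat)]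
    intro a
    simp only [PySem.Set.mem_ofList]
    exact hperm.mem_iff
  have hsorted : PySem.List.sorted (PySem.Set.ofList flat) (fun x => x) false
      = PySem.Set.ofList s :=
    PySem.List.sorted_eq_of_perm_of_pairwise_lt _ _ _ hpermSet hlt
  rw [hkeys, hsorted, PySem.List.foldl_append_singleton_eq_map, List.nil_append,
    rle_sorted s hsp]
  apply List.map_congr_left
  intro k hk
  have hkflat : k ∈ flat := hperm.mem_iff.1 (hsub.mem hk)
  rw [hdA, getD_foldA]
  simp [hkflat, hperm.count_eq]

-- ===== VERDICT (by name: the statement is the Claim_ definition above) =====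
theorem getDegreeSequence_spec : Claim_equal_getDegreeSequence := by
  intro t _
  unfold Spec_getDegreeSequence
  exact main_eq t
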